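-- pv_equiv track=rewrite | github.com/AlexWUrobot/leetcode_python | Process Queue.py | process_queue
-- ===== SOURCE A (Python) =====
-- def remove_elements(lst, k):
--     return [x for x in lst if x != k]
--
-- def process_queue(wait):
--
--     n = len(wait)
--     wait_process = []
--     t = 0
--     while wait != []:
--         # remove one elemnt
--         wait = wait[1:]
--         wait = remove_elements(wait, t)
--         wait_process.append(len(wait))
--         t = t + 1
--     return wait_process
-- ===== SOURCE B (Python) =====
-- def process_queue(wait):
--     # One-pass pointer/counter simulation: never rebuilds the queue. A frequency
--     # table gives the number of queued elements equal to t in O(1); the front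
--     # pointer skips values v with 0 <= v < t, which were bulk-removed at step v.
--     cnt = {}
--     for x in wait:
--         cnt[x] = cnt.get(x, 0) + 1
--     res = []
--     i = 0
--     remaining = len(wait)
--     t = 0
--     while remaining > 0:
--         while 0 <= wait[i] < t:
--             i += 1
--         f = wait[i]
--         i += 1
--         cnt[f] -= 1
--         remaining -= 1
--         c = cnt.get(t, 0)
--         if c:
--             cnt[t] = 0
--             remaining -= c
--         res.append(remaining)
--         t += 1
--     return res
-- ===== Notes on version B (the rewrite author's own statement) =====
-- stated objective: faster
-- what changed: Instead of rebuilding the queue every step (slice + filter), B does a single-pass pointer/counter simulation: a frequency table gives the number of elements equal to t in O(1), the front pointer skips values already bulk-removed, and only the remaining count is maintained.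
import Mathlib
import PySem

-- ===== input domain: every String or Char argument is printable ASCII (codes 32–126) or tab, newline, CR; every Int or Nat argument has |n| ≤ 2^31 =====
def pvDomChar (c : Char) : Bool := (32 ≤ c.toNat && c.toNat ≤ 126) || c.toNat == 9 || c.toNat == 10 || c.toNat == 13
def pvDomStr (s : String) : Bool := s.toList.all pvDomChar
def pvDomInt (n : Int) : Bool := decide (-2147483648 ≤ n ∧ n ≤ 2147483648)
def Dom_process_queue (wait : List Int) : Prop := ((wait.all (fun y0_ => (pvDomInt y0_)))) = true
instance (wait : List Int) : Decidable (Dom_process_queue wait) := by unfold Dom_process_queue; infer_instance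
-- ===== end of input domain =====

-- B replaces A's per-step queue rebuilding (slice + filter) by a one-pass pointer/counter
-- simulation; objective: faster (asymptotic, O(n) vs O(n^2)).

-- ===== PORT A =====
def remove_elements (lst : List Int) (k : Int) : List Int :=
  lst.filter (fun x => x != k)

def pqLoopA (wait : List Int) (t : Int) (acc : List Int) : List Int :=
  if hnil : wait = [] then acc
  else
    -- wait = wait[1:]; wait = remove_elements(wait, t); wait_process.append(len(wait))
    let w := remove_elements (PySem.List.slice wait (some 1) none) t
    pqLoopA w (t + 1) (acc ++ [(w.length : Int)])
termination_by wait.length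
decreasing_by
  simp only [remove_elements, PySem.List.slice_from_one]
  calc (wait.tail.filter (fun x => x != t)).length
      ≤ wait.tail.length := List.length_filter_le _ _
    _ < wait.length := by cases wait with
        | nil => simp at hnil
        | cons a l => simp

def process_queue (wait : List Int) : List Int :=
  pqLoopA wait 0 []

-- ===== PORT B =====
-- inner `while 0 <= wait[i] < t: i += 1`; the out-of-range branch returns i
-- (it is unreachable in B's Python: while remaining > 0 an unremoved element lies at index ≥ i)
def pqSkip (wait : List Int) (t : Int) (i : Nat) : Nat :=
  if h : i < wait.length then
    if 0 ≤ wait[i] ∧ wait[i] < t then pqSkip wait t (i + 1) else i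
  else i
termination_by wait.length - i

theorem pqSkip_ge (wait : List Int) (t : Int) (i : Nat) : i ≤ pqSkip wait t i := by
  fun_induction pqSkip with
  | case1 i h hc ih => omega
  | case2 i h hc => omega
  | case3 i h => omega

def pqLoopB (wait : List Int) (cnt : PySem.Dict Int Int) (i : Nat) (remaining : Int)
    (t : Int) (acc : List Int) : List Int :=
  if remaining > 0 then
    let i1 := pqSkip wait t i
    match h : PySem.List.pyGet? wait (i1 : Int) with
    | some f =>
      -- cnt[f] -= 1  (f is always present; ported as modify with default 0)
      let cnt1 := cnt.modify f 0 (· - 1)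
      let r1 := remaining - 1
      let c := cnt1.getD t 0
      let s := if c ≠ 0 then (cnt1.insert t 0, r1 - c) else (cnt1, r1)
      pqLoopB wait s.1 (i1 + 1) s.2 (t + 1) (acc ++ [s.2])
    | none => acc  -- unreachable totality guard (Python would raise IndexError here)
  else acc
termination_by wait.length + 1 - i
decreasing_by
  have h1 : i ≤ pqSkip wait t i := pqSkip_ge wait t i
  have h2 : pqSkip wait t i < wait.length := by
    by_contra hc
    rw [PySem.List.pyGet?_natCast, List.getElem?_eq_none (by omega)] at h
    simp at h
  omega

def process_queue_alt (wait : List Int) : List Int :=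
  let cnt := wait.foldl (fun d x => d.insert x (d.getD x 0 + 1)) PySem.Dict.empty
  pqLoopB wait cnt 0 (wait.length : Int) 0 []

-- ===== PRECONDITION & SPEC =====
def Spec_process_queue (wait : List Int) (out : List Int) : Prop := out = process_queue_alt wait
instance (wait : List Int) (out : List Int) : Decidable (Spec_process_queue wait out) := by unfold Spec_process_queue; infer_instance

-- ===== CLAIM (what is proved, stated in full; the proofs are below) =====
def Claim_equal_process_queue : Prop := ∀ (wait : List Int), Dom_process_queue wait → Spec_process_queue wait (process_queue wait)

-- ===== LEMMAS AND PROOFS =====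

-- "still in the queue at step t": negative, or not yet reached by the bulk removals 0..t-1
def pqKeep (t x : Int) : Bool := decide (x < 0 ∨ t ≤ x)

theorem pqKeep_zero (l : List Int) : l.filter (pqKeep 0) = l := by
  apply List.filter_eq_self.mpr
  intro x _
  simp [pqKeep]; omega

theorem pqKeep_succ_eq (t x : Int) (ht : 0 ≤ t) :
    pqKeep (t + 1) x = ((x != t) && pqKeep t x) := by
  by_cases h1 : x = t
  · have hfalse : pqKeep (t + 1) x = false := by
      simp only [pqKeep, decide_eq_false_iff_not]
      omega
    rw [hfalse, h1]
    simp
  · have hb : (x != t) = true := by simp [bne_iff_ne, h1]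
    simp only [pqKeep, hb, Bool.true_and, decide_eq_decide]
    omega

theorem pqFilter_succ (t : Int) (ht : 0 ≤ t) (l : List Int) :
    (l.filter (pqKeep t)).filter (fun x => x != t) = l.filter (pqKeep (t + 1)) := by
  rw [List.filter_filter]
  apply List.filter_congr
  intro x _
  exact (pqKeep_succ_eq t x ht).symm

theorem pqLen_filter_ne (t : Int) (l : List Int) :
    (l.filter (fun x => x != t)).length = l.length - l.count t := by
  induction l with
  | nil => simp
  | cons a l ih =>
    have hle : l.count t ≤ l.length := List.count_le_length
    by_cases h : a = t
    · subst h
      simp [List.count_cons, ih]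
    · simp [List.count_cons, h, ih, List.filter_cons, bne_iff_ne]
      omega

theorem pqCount_filter_ne (v t : Int) (hv : v ≠ t) (l : List Int) :
    (l.filter (fun x => x != t)).count v = l.count v := by
  induction l with
  | nil => simp
  | cons a l ih =>
    by_cases h : a = t
    · subst h
      simp [List.filter_cons, List.count_cons, hv, ih]
      omega
    · simp [List.filter_cons, List.count_cons, h, ih, bne_iff_ne]

theorem pqCount_keep_succ_self (t : Int) (ht : 0 ≤ t) (l : List Int) :
    (l.filter (pqKeep (t + 1))).count t = 0 := by
  apply List.count_eq_zero.mpr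
  intro hmem
  have := List.of_mem_filter hmem
  simp [pqKeep] at this
  omega

-- skip stops at the first element of the suffix that is still in the queue
theorem pqSkip_spec (wait : List Int) (t : Int) (i : Nat)
    (hne : (wait.drop i).filter (pqKeep t) ≠ []) :
    ∃ hj : pqSkip wait t i < wait.length,
      pqKeep t (wait[pqSkip wait t i]'hj) = true ∧
      (wait.drop i).filter (pqKeep t) =
        wait[pqSkip wait t i]'hj ::
          (wait.drop (pqSkip wait t i + 1)).filter (pqKeep t) := by
  fun_induction pqSkip wait t i with
  | case1 i h hc ih =>
    have hdrop : wait.drop i = wait[i] :: wait.drop (i + 1) := List.drop_eq_getElem_cons h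
    have hkf : pqKeep t wait[i] = false := by
      simp only [pqKeep, decide_eq_false_iff_not]
      omega
    have hred : pqSkip wait t i = pqSkip wait t (i + 1) := by
      rw [pqSkip]; simp [h, hc]
    have hfe : (wait.drop i).filter (pqKeep t) = (wait.drop (i + 1)).filter (pqKeep t) := by
      rw [hdrop, List.filter_cons, hkf]; simp
    rw [hfe] at hne
    obtain ⟨hj, h1, h2⟩ := ih hne
    rw [hred] at *
    exact ⟨hj, h1, by rw [hfe, h2]⟩
  | case2 i h hc =>
    have hdrop : wait.drop i = wait[i] :: wait.drop (i + 1) := List.drop_eq_getElem_cons h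
    have hkf : pqKeep t wait[i] = true := by
      simp only [pqKeep, decide_eq_true_eq]
      omega
    exact ⟨h, hkf, by rw [hdrop, List.filter_cons, hkf]; simp⟩
  | case3 i h =>
    exfalso
    apply hne
    rw [List.drop_of_length_le (by omega)]
    rfl

-- main loop correspondence
theorem pqLoop_eq (n : Nat) : ∀ (wait : List Int) (cnt : PySem.Dict Int Int) (i : Nat)
    (t : Int) (acc : List Int), 0 ≤ t →
    ((wait.drop i).filter (pqKeep t)).length = n →
    (∀ v : Int, cnt.getD v 0 = (((wait.drop i).filter (pqKeep t)).count v : Int)) →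
    pqLoopA ((wait.drop i).filter (pqKeep t)) t acc = pqLoopB wait cnt i (n : Int) t acc := by
  induction n using Nat.strong_induction_on with
  | _ n ih =>
  intro wait cnt i t acc ht hlen hcnt
  by_cases hn : n = 0
  · subst hn
    have hL : (wait.drop i).filter (pqKeep t) = [] := List.length_eq_zero_iff.mp hlen
    rw [hL, pqLoopA, pqLoopB]
    simp
  · have hne : (wait.drop i).filter (pqKeep t) ≠ [] := by
      intro hc; rw [hc] at hlen; simp at hlen; omega
    obtain ⟨hj, hkeep, hL⟩ := pqSkip_spec wait t i hne
    set j := pqSkip wait t i with hjdef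
    set f := wait[j]'hj with hfdef
    set rest := (wait.drop (j + 1)).filter (pqKeep t) with hrest
    -- counts
    have hcL : ∀ v : Int, ((wait.drop i).filter (pqKeep t)).count v
        = rest.count v + if f = v then 1 else 0 := by
      intro v; rw [hL]; simp [List.count_cons]
    have hrestlen : rest.length + 1 = n := by
      rw [← hlen, hL]; simp
    have hcount_le : rest.count t ≤ rest.length := List.count_le_length
    -- next-step filtered suffix
    have hnext : rest.filter (fun x => x != t) = (wait.drop (j + 1)).filter (pqKeep (t + 1)) :=
      pqFilter_succ t ht _
    have hnextlen : ((wait.drop (j + 1)).filter (pqKeep (t + 1))).length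
        = rest.length - rest.count t := by
      rw [← hnext, pqLen_filter_ne]
    -- unfold A one step
    have hAstep : pqLoopA ((wait.drop i).filter (pqKeep t)) t acc
        = pqLoopA ((wait.drop (j + 1)).filter (pqKeep (t + 1))) (t + 1)
            (acc ++ [(((wait.drop (j + 1)).filter (pqKeep (t + 1))).length : Int)]) := by
      rw [pqLoopA, dif_neg hne]
      have htail : PySem.List.slice ((wait.drop i).filter (pqKeep t)) (some 1) none = rest := by
        rw [PySem.List.slice_from_one, hL]; rfl
      simp only [remove_elements, htail, hnext]
    -- unfold B one step
    have hget : PySem.List.pyGet? wait ((j : Nat) : Int) = some f := by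
      rw [PySem.List.pyGet?_natCast, List.getElem?_eq_getElem hj]
    have c1 : (cnt.modify f 0 (· - 1)).getD t 0 = (rest.count t : Int) := by
      rw [PySem.Dict.getD_modify]
      by_cases hft : (t : Int) = f
      · rw [if_pos hft, hcnt, hcL f]
        simp only [if_pos rfl, ← hft]
        push_cast
        omega
      · rw [if_neg hft, hcnt, hcL t]
        have : ¬ f = t := fun hh => hft hh.symm
        simp [this]
    have hBstep : pqLoopB wait cnt i (n : Int) t acc
        = pqLoopB wait
            (if (rest.count t : Int) ≠ 0 then (cnt.modify f 0 (· - 1)).insert t 0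
              else cnt.modify f 0 (· - 1))
            (j + 1)
            ((((wait.drop (j + 1)).filter (pqKeep (t + 1))).length : Nat) : Int) (t + 1)
            (acc ++ [((((wait.drop (j + 1)).filter (pqKeep (t + 1))).length : Nat) : Int)]) := by
      rw [pqLoopB, if_pos (by exact_mod_cast Nat.pos_of_ne_zero hn)]
      simp only [← hjdef]
      split
      · next f' heq =>
        rw [hget] at heq
        injection heq with heq'
        subst heq'
        simp only [c1]
        have hr2 : (if (rest.count t : Int) ≠ 0 then ((n : Int) - 1 - (rest.count t : Int))
            else ((n : Int) - 1))
            = ((((wait.drop (j + 1)).filter (pqKeep (t + 1))).length : Nat) : Int) := by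
          rw [hnextlen]
          by_cases hz : (rest.count t : Int) = 0
          · rw [if_neg (by simp [hz])]
            have : rest.count t = 0 := by exact_mod_cast hz
            rw [this]
            push_cast
            omega
          · rw [if_pos hz]
            push_cast [Nat.cast_sub hcount_le]
            omega
        by_cases hz : (rest.count t : Int) ≠ 0
        · simp only [if_pos hz, ← hr2, if_pos hz]
        · simp only [if_neg hz, ← hr2, if_neg hz]
      · next heq =>
        rw [hget] at heq
        exact absurd heq (by simp)
    rw [hAstep, hBstep]
    -- invariant for the next step
    have hcnt2 : ∀ v : Int,
        (if (rest.count t : Int) ≠ 0 then (cnt.modify f 0 (· - 1)).insert t 0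
          else cnt.modify f 0 (· - 1)).getD v 0
        = (((wait.drop (j + 1)).filter (pqKeep (t + 1))).count v : Int) := by
      intro v
      by_cases hvt : v = t
      · rw [hvt, pqCount_keep_succ_self t ht]
        by_cases hz : (rest.count t : Int) ≠ 0
        · rw [if_pos hz, PySem.Dict.getD_insert]
          simp
        · rw [if_neg hz, c1]
          rw [not_not] at hz
          simp [hz]
      · have hcv : ((wait.drop (j + 1)).filter (pqKeep (t + 1))).count v = rest.count v := by
          rw [← hnext, pqCount_filter_ne v t hvt]
        have hmod : (cnt.modify f 0 (· - 1)).getD v 0 = (rest.count v : Int) := by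
          rw [PySem.Dict.getD_modify]
          by_cases hvf : v = f
          · rw [if_pos hvf, hvf, hcnt, hcL f]
            simp
          · rw [if_neg hvf, hcnt, hcL v]
            have : ¬ f = v := fun hh => hvf hh.symm
            simp [this]
        rw [hcv]
        by_cases hz : (rest.count t : Int) ≠ 0
        · rw [if_pos hz, PySem.Dict.getD_insert, if_neg hvt, hmod]
        · rw [if_neg hz, hmod]
    exact ih (((wait.drop (j + 1)).filter (pqKeep (t + 1))).length) (by omega)
      wait _ (j + 1) (t + 1) _ (by omega) rfl hcnt2

-- ===== VERDICT (by name: the statement is the Claim_ definition above) =====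
theorem process_queue_spec : Claim_equal_process_queue := by
  intro wait _
  unfold Spec_process_queue process_queue process_queue_alt
  have hcnt : ∀ v : Int,
      (wait.foldl (fun d x => d.insert x (d.getD x 0 + 1)) PySem.Dict.empty).getD v 0
        = ((wait.count v : Nat) : Int) := by
    intro v
    rw [PySem.Dict.getD_foldl_insert_add_one, PySem.Dict.getD_empty]
    simp
  have := pqLoop_eq wait.length wait
      (wait.foldl (fun d x => d.insert x (d.getD x 0 + 1)) PySem.Dict.empty) 0 0 []
      (by omega) (by simp [pqKeep_zero]) (by intro v; rw [hcnt]; simp [pqKeep_zero])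
  simpa [pqKeep_zero] using this
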